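-- pv_equiv track=rewrite | github.com/FedeLochbaum/advent_of_code_2023 | challenges/Day 5: If You Give A Seed A Fertilizer/almanac.py | map_source
-- ===== SOURCE A (Python) =====
-- def there_intersection(r1, r2): return not (r2[0] > r1[1] or r2[1] < r1[0])
--
-- def intersection(r1, r2):
--   i, e = max(r1[0], r2[0]), min(r1[1], r2[1])
--   limits = []
--   if i > r1[0]: limits.append((r1[0], i))
--   if e < r1[1]: limits.append((e, r1[1]))
--
--   return (i + r2[2], e + r2[2]), limits
--
-- def map_source(_map, source_range):
--
--   for map_range in _map:
--     if source_range[0] == map_range[1] or source_range[1] == map_range[0]: continue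
--     if there_intersection(source_range, map_range):
--       inter, limits = intersection(source_range, map_range)
--       res = [inter]
--       for limit in limits: res += map_source(_map, limit)
--       return res
--
--   return [source_range]
-- ===== SOURCE B (Python) =====
-- def there_intersection(r1, r2): return not (r2[0] > r1[1] or r2[1] < r1[0])
--
-- def intersection(r1, r2):
--   i, e = max(r1[0], r2[0]), min(r1[1], r2[1])
--   limits = []
--   if i > r1[0]: limits.append((r1[0], i))
--   if e < r1[1]: limits.append((e, r1[1]))
--
--   return (i + r2[2], e + r2[2]), limits
--
-- def map_source(_map, source_range):
--   out = []
--   stack = [source_range]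
--   while stack:
--     r = stack.pop()
--     for map_range in _map:
--       if r[0] == map_range[1] or r[1] == map_range[0]: continue
--       if there_intersection(r, map_range):
--         inter, limits = intersection(r, map_range)
--         out.append(inter)
--         # push leftovers in reverse so the left piece is processed first
--         for limit in reversed(limits): stack.append(limit)
--         break
--     else:
--       out.append(r)
--   return out
-- ===== Notes on version B (the rewrite author's own statement) =====
-- stated objective: alternative
-- what changed: Replaces A's re-entrant recursion (each leftover sub-interval restarts map_source recursively) by a single iterative loop over an explicit worklist stack, pushing leftovers in reverse so segments are emitted in the same preorder.
import Mathlib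
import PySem

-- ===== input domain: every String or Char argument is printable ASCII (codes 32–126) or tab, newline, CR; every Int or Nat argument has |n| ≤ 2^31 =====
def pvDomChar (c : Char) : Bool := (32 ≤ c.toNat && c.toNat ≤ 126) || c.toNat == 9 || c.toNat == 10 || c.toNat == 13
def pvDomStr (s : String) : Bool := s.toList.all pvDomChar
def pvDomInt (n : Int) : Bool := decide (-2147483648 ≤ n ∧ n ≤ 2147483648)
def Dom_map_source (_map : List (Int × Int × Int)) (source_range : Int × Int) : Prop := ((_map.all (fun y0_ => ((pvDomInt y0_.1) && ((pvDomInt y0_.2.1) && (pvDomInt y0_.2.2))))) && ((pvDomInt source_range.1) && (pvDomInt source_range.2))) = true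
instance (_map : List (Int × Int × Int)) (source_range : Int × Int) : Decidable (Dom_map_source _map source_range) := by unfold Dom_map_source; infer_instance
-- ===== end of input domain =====

-- B replaces A's re-entrant recursion by one iterative loop over an explicit worklist stack
-- (leftovers pushed in reverse), emitting the same segments in the same order (alternative decomposition).
-- Both ports carry a Nat fuel argument purely as a totality guard; it is proved sufficient below.

-- ===== PORT A =====
def there_intersection (r1 : Int × Int) (r2 : Int × Int × Int) : Bool :=
  !(r2.1 > r1.2 || r2.2.1 < r1.1)

def intersection (r1 : Int × Int) (r2 : Int × Int × Int) : (Int × Int) × List (Int × Int) :=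
  let i := max r1.1 r2.1
  let e := min r1.2 r2.2.1
  let limits := (if i > r1.1 then [(r1.1, i)] else []) ++ (if e < r1.2 then [(e, r1.2)] else [])
  ((i + r2.2.2, e + r2.2.2), limits)

-- the 'for map_range in _map' loop of A; 'next' is the recursive call on a leftover interval
def msLoop (next : (Int × Int) → List (Int × Int)) (rem : List (Int × Int × Int))
    (sr : Int × Int) : List (Int × Int) :=
  match rem with
  | [] => [sr]
  | mr :: rest =>
    if sr.1 == mr.2.1 || sr.2 == mr.1 then msLoop next rest sr
    else if there_intersection sr mr then
      let p := intersection sr mr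
      [p.1] ++ p.2.foldl (fun res limit => res ++ next limit) []
    else msLoop next rest sr

-- A's recursion, with a fuel bound (totality guard only; never exhausted from map_source)
def msGoF : Nat → List (Int × Int × Int) → (Int × Int) → List (Int × Int)
  | 0, _, sr => [sr]
  | fuel + 1, full, sr => msLoop (msGoF fuel full) full sr

def map_source (_map : List (Int × Int × Int)) (source_range : Int × Int) : List (Int × Int) :=
  msGoF ((source_range.2 - source_range.1).toNat + 1) _map source_range

-- ===== PORT B =====
-- inner for-loop of B: the first matching map range yields (inter, leftovers-with-left-first);
-- Python pushes the leftovers in reverse, so the left one ends on top of the stack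
def bScan (rem : List (Int × Int × Int)) (r : Int × Int) :
    Option ((Int × Int) × List (Int × Int)) :=
  match rem with
  | [] => none
  | mr :: rest =>
    if r.1 == mr.2.1 || r.2 == mr.1 then bScan rest r
    else if there_intersection r mr then some ((intersection r mr).1, (intersection r mr).2)
    else bScan rest r

-- the while-loop of B; list head = top of the Python stack; fuel is a totality guard only
def bLoopF (fuel : Nat) (full : List (Int × Int × Int)) (stack : List (Int × Int))
    (out : List (Int × Int)) : List (Int × Int) :=
  match fuel, stack with
  | _, [] => out
  | 0, _ => out
  | fuel + 1, r :: st =>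
    match bScan full r with
    | none => bLoopF fuel full st (out ++ [r])
    | some p => bLoopF fuel full (p.2 ++ st) (out ++ [p.1])

def map_source_alt (_map : List (Int × Int × Int)) (source_range : Int × Int) : List (Int × Int) :=
  bLoopF (2 ^ (_map.length + 1)) _map [source_range] []

-- ===== PRECONDITION & SPEC =====
def Spec_map_source (_map : List (Int × Int × Int)) (source_range : Int × Int) (out : List (Int × Int)) : Prop := out = map_source_alt _map source_range
instance (_map : List (Int × Int × Int)) (source_range : Int × Int) (out : List (Int × Int)) : Decidable (Spec_map_source _map source_range out) := by unfold Spec_map_source; infer_instance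

-- ===== CLAIM (what is proved, stated in full; the proofs are below) =====
def Claim_equal_map_source : Prop := ∀ (_map : List (Int × Int × Int)) (source_range : Int × Int), Dom_map_source _map source_range → Spec_map_source _map source_range (map_source _map source_range)

-- ===== LEMMAS AND PROOFS =====

theorem skip_true_iff (x : Int × Int) (m : Int × Int × Int) :
    ((x.1 == m.2.1 || x.2 == m.1) = true) ↔ (x.1 = m.2.1 ∨ x.2 = m.1) := by
  simp

theorem inter_true_iff (x : Int × Int) (m : Int × Int × Int) :
    (there_intersection x m = true) ↔ (m.1 ≤ x.2 ∧ x.1 ≤ m.2.1) := by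
  simp only [there_intersection, Bool.not_eq_eq_eq_not, Bool.not_true, Bool.or_eq_false_iff,
    decide_eq_false_iff_not, not_lt]

-- any split piece is a strict sub-interval keeping one endpoint, and meets the
-- matched range exactly at its border (so that range is skipped from then on)
theorem pieces_props (r : Int × Int) (mr : Int × Int × Int)
    (hne : ¬((r.1 == mr.2.1 || r.2 == mr.1) = true))
    (hint : there_intersection r mr = true) :
    ∀ l ∈ (intersection r mr).2,
      (l.1 = r.1 ∧ r.1 < l.2 ∧ l.2 < r.2 ∧ l.2 = mr.1) ∨
      (l.2 = r.2 ∧ r.1 < l.1 ∧ l.1 < r.2 ∧ l.1 = mr.2.1) := by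
  intro l hl
  rw [skip_true_iff, not_or] at hne
  rw [inter_true_iff] at hint
  simp only [intersection, List.mem_append] at hl
  obtain ⟨h1, h2⟩ := hne
  obtain ⟨h3, h4⟩ := hint
  rcases hl with h | h
  · split at h
    · simp only [List.mem_singleton] at h
      subst h
      left
      refine ⟨rfl, ?_, ?_, ?_⟩ <;> simp only [] <;> omega
    · simp at h
  · split at h
    · simp only [List.mem_singleton] at h
      subst h
      right
      refine ⟨rfl, ?_, ?_, ?_⟩ <;> simp only [] <;> omega
    · simp at h

theorem bScan_some_shape {rem : List (Int × Int × Int)} {r : Int × Int}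
    {q : (Int × Int) × List (Int × Int)} (h : bScan rem r = some q) :
    ∃ mr, ¬((r.1 == mr.2.1 || r.2 == mr.1) = true) ∧ there_intersection r mr = true ∧
      q = intersection r mr := by
  induction rem with
  | nil => simp [bScan] at h
  | cons mr rest ih =>
    rw [bScan] at h
    split at h
    · exact ih h
    · split at h
      · rename_i hne hint
        simp only [Option.some.injEq] at h
        exact ⟨mr, hne, hint, h.symm⟩
      · exact ih h

theorem child_props_scan {rem : List (Int × Int × Int)} {r : Int × Int}
    {q : (Int × Int) × List (Int × Int)} (h : bScan rem r = some q) :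
    ∀ l ∈ q.2, (l.1 = r.1 ∧ r.1 < l.2 ∧ l.2 < r.2) ∨ (l.2 = r.2 ∧ r.1 < l.1 ∧ l.1 < r.2) := by
  intro l hl
  obtain ⟨mr, hne, hint, hq⟩ := bScan_some_shape h
  subst hq
  rcases pieces_props r mr hne hint l hl with ⟨a, b, c, _⟩ | ⟨a, b, c, _⟩
  · exact Or.inl ⟨a, b, c⟩
  · exact Or.inr ⟨a, b, c⟩

-- a sub-interval piece rejects (skips or misses) every range its parent rejected
theorem reject_child {r l : Int × Int} {mr : Int × Int × Int}
    (hc : (l.1 = r.1 ∧ r.1 < l.2 ∧ l.2 < r.2) ∨ (l.2 = r.2 ∧ r.1 < l.1 ∧ l.1 < r.2))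
    (hr : (r.1 == mr.2.1 || r.2 == mr.1) = true ∨ there_intersection r mr = false) :
    (l.1 == mr.2.1 || l.2 == mr.1) = true ∨ there_intersection l mr = false := by
  rw [skip_true_iff, ← Bool.not_eq_true, inter_true_iff, not_and_or, not_le, not_le] at hr ⊢
  omega

-- index of the first map range an interval matches (list length if none does)
def scanDepth (rem : List (Int × Int × Int)) (r : Int × Int) : Nat :=
  match rem with
  | [] => 0
  | mr :: rest =>
    if r.1 == mr.2.1 || r.2 == mr.1 then scanDepth rest r + 1
    else if there_intersection r mr then 0
    else scanDepth rest r + 1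

theorem sd_le (rem : List (Int × Int × Int)) (r : Int × Int) :
    scanDepth rem r ≤ rem.length := by
  induction rem with
  | nil => simp [scanDepth]
  | cons mr rest ih =>
    rw [scanDepth]
    split
    · simp only [List.length_cons]; omega
    · split
      · simp only [List.length_cons]; omega
      · simp only [List.length_cons]; omega

theorem sd_lt {rem : List (Int × Int × Int)} {r : Int × Int}
    {q : (Int × Int) × List (Int × Int)} (h : bScan rem r = some q) :
    scanDepth rem r < rem.length := by
  induction rem with
  | nil => simp [bScan] at h
  | cons mr rest ih =>
    rw [bScan] at h
    rw [scanDepth]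
    split at h
    · rename_i hs
      rw [if_pos hs]
      simp only [List.length_cons]
      exact Nat.succ_lt_succ (ih h)
    · rename_i hs
      split at h
      · rename_i hi
        rw [if_neg hs, if_pos hi]
        simp only [List.length_cons]
        omega
      · rename_i hi
        rw [if_neg hs, if_neg hi]
        simp only [List.length_cons]
        exact Nat.succ_lt_succ (ih h)

-- the first matching index strictly increases from an interval to any of its pieces
theorem sd_child {rem : List (Int × Int × Int)} {r : Int × Int}
    {q : (Int × Int) × List (Int × Int)} (h : bScan rem r = some q) :
    ∀ l ∈ q.2, scanDepth rem r < scanDepth rem l := by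
  induction rem with
  | nil => simp [bScan] at h
  | cons mr rest ih =>
    intro l hl
    rw [bScan] at h
    rw [scanDepth, scanDepth]
    split at h
    · rename_i hs
      rw [if_pos hs]
      rcases reject_child (child_props_scan h l hl) (Or.inl hs) with hsl | hni
      · rw [if_pos hsl]
        exact Nat.succ_lt_succ (ih h l hl)
      · by_cases hsl : (l.1 == mr.2.1 || l.2 == mr.1) = true
        · rw [if_pos hsl]
          exact Nat.succ_lt_succ (ih h l hl)
        · have hni' : ¬(there_intersection l mr = true) := by simp [hni]
          rw [if_neg hsl, if_neg hni']
          exact Nat.succ_lt_succ (ih h l hl)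
    · rename_i hs
      split at h
      · rename_i hi
        simp only [Option.some.injEq] at h
        subst h
        rw [if_neg hs, if_pos hi]
        have hp := pieces_props r mr hs hi l hl
        have hsl : (l.1 == mr.2.1 || l.2 == mr.1) = true := by
          rw [skip_true_iff]
          rcases hp with ⟨_, _, _, h4⟩ | ⟨_, _, _, h4⟩
          · exact Or.inr h4
          · exact Or.inl h4
        rw [if_pos hsl]
        omega
      · rename_i hi
        rw [if_neg hs, if_neg hi]
        have hnif : there_intersection r mr = false := eq_false_of_ne_true hi
        rcases reject_child (child_props_scan h l hl) (Or.inr hnif) with hsl | hni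
        · rw [if_pos hsl]
          exact Nat.succ_lt_succ (ih h l hl)
        · by_cases hsl : (l.1 == mr.2.1 || l.2 == mr.1) = true
          · rw [if_pos hsl]
            exact Nat.succ_lt_succ (ih h l hl)
          · have hni' : ¬(there_intersection l mr = true) := by simp [hni]
            rw [if_neg hsl, if_neg hni']
            exact Nat.succ_lt_succ (ih h l hl)

-- an upper bound on the number of worklist pops needed to fully resolve an interval
def cost (full : List (Int × Int × Int)) (r : Int × Int) : Nat :=
  2 ^ (full.length - scanDepth full r + 1) - 1

theorem cost_pos (full : List (Int × Int × Int)) (r : Int × Int) : 1 ≤ cost full r := by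
  have h2 : (2 : Nat) ^ 1 ≤ 2 ^ (full.length - scanDepth full r + 1) :=
    Nat.pow_le_pow_right (by norm_num) (by omega)
  simp only [cost]
  omega

theorem cost_step {full : List (Int × Int × Int)} {r : Int × Int}
    {q : (Int × Int) × List (Int × Int)} (h : bScan full r = some q) :
    (q.2.map (cost full)).sum + 1 ≤ cost full r := by
  have hdr := sd_lt h
  have hbound : ∀ l ∈ q.2, cost full l ≤ 2 ^ (full.length - scanDepth full r) - 1 := by
    intro l hl
    have h1 := sd_child h l hl
    have h2 := sd_le full l
    have hexp : full.length - scanDepth full l + 1 ≤ full.length - scanDepth full r := by omega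
    have hmono := Nat.pow_le_pow_right (by norm_num : 1 ≤ 2) hexp
    simp only [cost]
    omega
  have hXpos : 1 ≤ 2 ^ (full.length - scanDepth full r) := Nat.one_le_two_pow
  have hsucc : (2 : Nat) ^ (full.length - scanDepth full r + 1)
      = 2 ^ (full.length - scanDepth full r) * 2 := pow_succ 2 _
  have hcr : cost full r = 2 ^ (full.length - scanDepth full r + 1) - 1 := rfl
  obtain ⟨mr, hne, hint, hq⟩ := bScan_some_shape h
  rw [hq] at hbound ⊢
  simp only [intersection] at hbound ⊢
  split <;> split <;>
    rename_i h1 h2 <;>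
    simp only [List.nil_append, List.append_nil, List.cons_append, List.map_cons, List.map_nil,
      List.sum_cons, List.sum_nil]
  · have b1 := hbound (r.1, max r.1 mr.1) (by rw [if_pos h1, if_pos h2]; simp)
    have b2 := hbound (min r.2 mr.2.1, r.2) (by rw [if_pos h1, if_pos h2]; simp)
    omega
  · have b1 := hbound (r.1, max r.1 mr.1) (by rw [if_pos h1, if_neg h2]; simp)
    omega
  · have b2 := hbound (min r.2 mr.2.1, r.2) (by rw [if_neg h1, if_pos h2]; simp)
    omega
  · omega

-- any split piece is strictly smaller
theorem bScan_sizes {rem : List (Int × Int × Int)} {r : Int × Int}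
    {q : (Int × Int) × List (Int × Int)} (h : bScan rem r = some q) :
    ∀ l ∈ q.2, (l.2 - l.1).toNat < (r.2 - r.1).toNat := by
  intro l hl
  rcases child_props_scan h l hl with ⟨a, b, c⟩ | ⟨a, b, c⟩ <;> omega

-- fuel-free description of A's recursion (proof-side only)
def ares (full : List (Int × Int × Int)) (sr : Int × Int) : List (Int × Int) :=
  match h : bScan full sr with
  | none => [sr]
  | some p => p.1 :: p.2.attach.flatMap (fun l => ares full l.1)
termination_by (sr.2 - sr.1).toNat
decreasing_by exact bScan_sizes h l.1 l.2

theorem pv_flatMap_attach {α β : Type} (xs : List α) (f : α → List β) :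
    xs.attach.flatMap (fun x => f x.1) = xs.flatMap f := by
  conv_rhs => rw [← List.attach_map_subtype_val xs]
  rw [List.flatMap_map]

theorem msLoop_scan (next : (Int × Int) → List (Int × Int)) (rem : List (Int × Int × Int))
    (sr : Int × Int) :
    msLoop next rem sr =
      match bScan rem sr with
      | none => [sr]
      | some p => p.1 :: p.2.flatMap next := by
  induction rem with
  | nil => simp [msLoop, bScan]
  | cons mr rest ih =>
    rw [msLoop, bScan]
    split
    · exact ih
    · split
      · simp only []
        congr 1
        generalize (intersection sr mr).2 = ls
        induction ls using List.reverseRecOn with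
        | nil => simp
        | append_singleton xs x ihx =>
          simp only [List.foldl_append, List.foldl_cons, List.foldl_nil, List.flatMap_append,
            List.flatMap_cons, List.flatMap_nil, List.append_nil] at ihx ⊢
          rw [← List.append_assoc, ihx]
          simp
      · exact ih

-- the fuel bound of port A is sufficient
theorem msGoF_eq_ares (full : List (Int × Int × Int)) :
    ∀ fuel (sr : Int × Int), (sr.2 - sr.1).toNat < fuel → msGoF fuel full sr = ares full sr := by
  intro fuel
  induction fuel with
  | zero => intro sr h; omega
  | succ fuel ih =>
    intro sr hsr
    rw [msGoF, msLoop_scan, ares]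
    cases h : bScan full sr with
    | none => simp
    | some p =>
      simp only []
      congr 1
      have hsz := bScan_sizes h
      calc p.2.flatMap (msGoF fuel full)
          = p.2.flatMap (ares full) := by
            apply List.flatMap_congr
            intro l hl
            exact ih l (by have := hsz l hl; omega)
        _ = p.2.attach.flatMap (fun l => ares full l.1) :=
            (pv_flatMap_attach p.2 (ares full)).symm

-- fuel-free description of B's loop (proof-side only)
def bloopW (full : List (Int × Int × Int)) (stack : List (Int × Int))
    (out : List (Int × Int)) : List (Int × Int) :=
  match stack with
  | [] => out
  | r :: st =>
    match h : bScan full r with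
    | none => bloopW full st (out ++ [r])
    | some p => bloopW full (p.2 ++ st) (out ++ [p.1])
termination_by (stack.map (cost full)).sum
decreasing_by
  · have := cost_pos full r
    simp only [List.map_cons, List.sum_cons]
    omega
  · have := cost_step h
    simp only [List.map_append, List.sum_append, List.map_cons, List.sum_cons]
    omega

-- the fuel bound of port B is sufficient
theorem bLoopF_eq_bloopW (full : List (Int × Int × Int)) :
    ∀ fuel (stack : List (Int × Int)) (out : List (Int × Int)),
      (stack.map (cost full)).sum ≤ fuel → bLoopF fuel full stack out = bloopW full stack out := by
  intro fuel
  induction fuel with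
  | zero =>
    intro stack out h
    cases stack with
    | nil => rw [bLoopF, bloopW]
    | cons r st =>
      exfalso
      have := cost_pos full r
      simp only [List.map_cons, List.sum_cons] at h
      omega
  | succ fuel ih =>
    intro stack out h
    cases stack with
    | nil => rw [bLoopF, bloopW]
    | cons r st =>
      rw [bLoopF, bloopW]
      simp only [List.map_cons, List.sum_cons] at h
      cases hs : bScan full r with
      | none =>
        have := cost_pos full r
        exact ih st (out ++ [r]) (by omega)
      | some p =>
        have hp := cost_step hs
        refine ih (p.2 ++ st) (out ++ [p.1]) ?_
        simp only [List.map_append, List.sum_append]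
        omega

-- processing the top of the stack appends exactly A's result for that interval
theorem bloopW_cons (full : List (Int × Int × Int)) :
    ∀ w (r : Int × Int), cost full r ≤ w →
      ∀ st out, bloopW full (r :: st) out = bloopW full st (out ++ ares full r) := by
  intro w
  induction w using Nat.strong_induction_on with
  | _ w ih =>
    intro r hw st out
    rw [bloopW, ares]
    cases h : bScan full r with
    | none => simp
    | some p =>
      simp only []
      have hps := cost_step h
      have hlist : ∀ ps : List (Int × Int), (ps.map (cost full)).sum < cost full r →
          ∀ st out, bloopW full (ps ++ st) out
            = bloopW full st (out ++ ps.flatMap (ares full)) := by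
        intro ps
        induction ps with
        | nil => intro _ st out; simp
        | cons q qs ihq =>
          intro hsum st out
          simp only [List.map_cons, List.sum_cons] at hsum
          have hq1 := cost_pos full q
          simp only [List.cons_append]
          rw [ih (cost full q) (by omega) q le_rfl, ihq (by omega), List.flatMap_cons,
            List.append_assoc]
      rw [hlist p.2 (by omega), pv_flatMap_attach p.2 (ares full)]
      simp

-- ===== VERDICT (by name: the statement is the Claim_ definition above) =====
theorem map_source_spec : Claim_equal_map_source := by
  intro _map sr _
  unfold Spec_map_source map_source map_source_alt
  rw [msGoF_eq_ares _map _ sr (by omega)]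
  have hmono : (2 : Nat) ^ (_map.length - scanDepth _map sr + 1) ≤ 2 ^ (_map.length + 1) :=
    Nat.pow_le_pow_right (by norm_num) (by omega)
  have hmono2 : (2 : Nat) ^ (_map.length - scanDepth _map sr) ≤ 2 ^ _map.length :=
    Nat.pow_le_pow_right (by norm_num) (by omega)
  have hb : (([sr].map (cost _map)).sum) ≤ 2 ^ (_map.length + 1) := by
    have hp1 : 1 ≤ (2 : Nat) ^ (_map.length - scanDepth _map sr) := Nat.one_le_two_pow
    have hp2 : 1 ≤ (2 : Nat) ^ _map.length := Nat.one_le_two_pow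
    have hs1 : (2 : Nat) ^ (_map.length - scanDepth _map sr + 1)
        = 2 ^ (_map.length - scanDepth _map sr) * 2 := pow_succ 2 _
    have hs2 : (2 : Nat) ^ (_map.length + 1) = 2 ^ _map.length * 2 := pow_succ 2 _
    simp only [List.map_cons, List.map_nil, List.sum_cons, List.sum_nil, cost]
    omega
  rw [bLoopF_eq_bloopW _map _ [sr] [] hb]
  rw [bloopW_cons _map (cost _map sr) sr le_rfl [] []]
  rw [bloopW]
  simp
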